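-- pv_equiv track=rewrite | github.com/MJmaolu/DVGfinder | ExternalNeeds/thirdPrograms/ViReMa_0.23/Compiler_Module.py | Indices
-- ===== SOURCE A (Python) =====
-- def Indices(List):
--     n = 1
--     Ms = []
--     Xs = []
--     for i in List:
--         if i == "M":
--             Ms.append(n)
--             n+=2
--         else:
--             Xs.append(n)
--             n+=1
--     return [Ms, Xs]
-- ===== SOURCE B (Python) =====
-- def Indices(List):
--     ms_idx = [k for k, v in enumerate(List) if v == "M"]
--     xs_idx = [k for k, v in enumerate(List) if v != "M"]
--     return [[1 + k + j for j, k in enumerate(ms_idx)],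
--             [1 + 2 * k - j for j, k in enumerate(xs_idx)]]
-- ===== Notes on version B (the rewrite author's own statement) =====
-- stated objective: alternative
-- what changed: Eliminates A's running position counter: B first collects the source indices of 'M' and non-'M' elements, then computes each position by the closed form 1+k+j for the j-th 'M' at index k and 1+2k-j for the j-th non-'M' at index k (each earlier element contributes 1 plus 1 extra per earlier 'M').
import Mathlib
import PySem

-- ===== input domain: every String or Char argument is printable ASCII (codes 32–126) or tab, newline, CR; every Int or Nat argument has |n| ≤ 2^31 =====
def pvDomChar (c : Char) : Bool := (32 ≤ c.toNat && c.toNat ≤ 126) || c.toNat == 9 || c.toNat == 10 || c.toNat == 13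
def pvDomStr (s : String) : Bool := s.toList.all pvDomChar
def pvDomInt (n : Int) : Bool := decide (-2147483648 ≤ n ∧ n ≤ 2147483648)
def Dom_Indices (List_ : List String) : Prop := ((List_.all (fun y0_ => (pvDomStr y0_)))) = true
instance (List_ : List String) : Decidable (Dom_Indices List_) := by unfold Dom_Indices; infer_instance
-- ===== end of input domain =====

-- B drops A's running position counter entirely: it computes each position by the closed
-- form 1+k+j (j-th "M" at source index k) / 1+2k-j (j-th non-"M" at index k); alternative, same cost.

-- ===== PORT A =====
def Indices_loop : List String → Int → List Int → List Int → List Int × List Int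
  | [], _, ms, xs => (ms, xs)
  | i :: rest, n, ms, xs =>
    if i == "M" then Indices_loop rest (n + 2) (ms ++ [n]) xs
    else Indices_loop rest (n + 1) ms (xs ++ [n])

def Indices (List_ : List String) : List (List Int) :=
  let r := Indices_loop List_ 1 [] []
  [r.1, r.2]

-- ===== PORT B =====
def Indices_alt (List_ : List String) : List (List Int) :=
  let msIdx := (PySem.List.enumerate List_ 0).filterMap
                 (fun p => if p.2 == "M" then some p.1 else none)
  let xsIdx := (PySem.List.enumerate List_ 0).filterMap
                 (fun p => if p.2 != "M" then some p.1 else none)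
  [(PySem.List.enumerate msIdx 0).map (fun p => 1 + p.2 + p.1),
   (PySem.List.enumerate xsIdx 0).map (fun p => 1 + 2 * p.2 - p.1)]

-- ===== PRECONDITION & SPEC =====
def Spec_Indices (List_ : List String) (out : List (List Int)) : Prop := out = Indices_alt List_
instance (List_ : List String) (out : List (List Int)) : Decidable (Spec_Indices List_ out) := by unfold Spec_Indices; infer_instance

-- ===== CLAIM (what is proved, stated in full; the proofs are below) =====
def Claim_equal_Indices : Prop := ∀ (List_ : List String), Dom_Indices List_ → Spec_Indices List_ (Indices List_)

-- ===== LEMMAS AND PROOFS =====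
-- reference position lists: exactly the successive values A's counter appends
def pvPM : List String → Int → List Int
  | [], _ => []
  | h :: t, n => if h == "M" then n :: pvPM t (n + 2) else pvPM t (n + 1)

def pvPX : List String → Int → List Int
  | [], _ => []
  | h :: t, n => if h == "M" then pvPX t (n + 2) else n :: pvPX t (n + 1)

theorem pvLoop_eq (L : List String) : ∀ (n : Int) (ms xs : List Int),
    Indices_loop L n ms xs = (ms ++ pvPM L n, xs ++ pvPX L n) := by
  induction L with
  | nil => intro n ms xs; simp [Indices_loop, pvPM, pvPX]
  | cons h t ih =>
    intro n ms xs
    by_cases hm : h == "M" <;> simp [Indices_loop, pvPM, pvPX, hm, ih]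

-- indices (from start s) of the "M" / non-"M" elements, as B computes them
def pvMIdx (L : List String) (s : Int) : List Int :=
  (PySem.List.enumerate L s).filterMap (fun p => if p.2 == "M" then some p.1 else none)

def pvXIdx (L : List String) (s : Int) : List Int :=
  (PySem.List.enumerate L s).filterMap (fun p => if p.2 != "M" then some p.1 else none)

theorem pvM_closed (L : List String) : ∀ (s j : Int),
    (PySem.List.enumerate (pvMIdx L s) j).map (fun p => 1 + p.2 + p.1) =
      pvPM L (1 + s + j) := by
  induction L with
  | nil => intro s j; simp [pvMIdx, pvPM, PySem.List.enumerate]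
  | cons h t ih =>
    intro s j
    by_cases hm : h = "M"
    · have e1 : pvMIdx (h :: t) s = s :: pvMIdx t (s + 1) := by
        simp [pvMIdx, PySem.List.enumerate_cons, hm]
      rw [e1, PySem.List.enumerate_cons, List.map_cons, ih]
      simp [pvPM, hm]
      rw [show 1 + (s + 1) + (j + 1) = 1 + s + j + 2 from by ring]
    · have e1 : pvMIdx (h :: t) s = pvMIdx t (s + 1) := by
        simp [pvMIdx, PySem.List.enumerate_cons, hm]
      rw [e1, ih]
      simp [pvPM, hm]
      rw [show 1 + (s + 1) + j = 1 + s + j + 1 from by ring]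

theorem pvX_closed (L : List String) : ∀ (s j : Int),
    (PySem.List.enumerate (pvXIdx L s) j).map (fun p => 1 + 2 * p.2 - p.1) =
      pvPX L (1 + 2 * s - j) := by
  induction L with
  | nil => intro s j; simp [pvXIdx, pvPX, PySem.List.enumerate]
  | cons h t ih =>
    intro s j
    by_cases hm : h = "M"
    · have e1 : pvXIdx (h :: t) s = pvXIdx t (s + 1) := by
        simp [pvXIdx, PySem.List.enumerate_cons, hm]
      rw [e1, ih]
      simp [pvPX, hm]
      rw [show 1 + 2 * (s + 1) - j = 1 + 2 * s - j + 2 from by ring]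
    · have e1 : pvXIdx (h :: t) s = s :: pvXIdx t (s + 1) := by
        simp [pvXIdx, PySem.List.enumerate_cons, hm]
      rw [e1, PySem.List.enumerate_cons, List.map_cons, ih]
      simp [pvPX, hm]
      rw [show 1 + 2 * (s + 1) - (j + 1) = 1 + 2 * s - j + 1 from by ring]

-- ===== VERDICT (by name: the statement is the Claim_ definition above) =====
theorem Indices_spec : Claim_equal_Indices := by
  intro L _
  unfold Spec_Indices Indices Indices_alt
  have hM := pvM_closed L 0 0
  have hX := pvX_closed L 0 0
  simp [pvMIdx, pvXIdx] at hM hX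
  simp [pvLoop_eq, hM, hX]
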